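-- pv_equiv track=rewrite | github.com/manishlad/adventofcode | 2018/07/sum_of_parts.py | find_start_points
-- ===== SOURCE A (Python) =====
-- from functools import reduce
--
-- def find_start_points(input_list):
--     start_points = []
--     for i in list(input_list.keys()):
--         s = list(map(lambda x: i in x, list(input_list.values())))
--         r = reduce((lambda x, y: x or y), s)
--         if not r:
--             start_points.append(i)
--     start_points.sort()
--     return start_points
-- ===== SOURCE B (Python) =====
-- def find_start_points(input_list):
--     used = set().union(*input_list.values())
--     return sorted(set(input_list) - used)
-- ===== Notes on version B (the rewrite author's own statement) =====
-- stated objective: faster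
-- what changed: Replaces the per-key loop (mapping a membership test over every value list and reducing with or) by building the union of all value elements once as a set and returning the sorted set-difference of the keys against it, so the inner scan over all values disappears.
import Mathlib
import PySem

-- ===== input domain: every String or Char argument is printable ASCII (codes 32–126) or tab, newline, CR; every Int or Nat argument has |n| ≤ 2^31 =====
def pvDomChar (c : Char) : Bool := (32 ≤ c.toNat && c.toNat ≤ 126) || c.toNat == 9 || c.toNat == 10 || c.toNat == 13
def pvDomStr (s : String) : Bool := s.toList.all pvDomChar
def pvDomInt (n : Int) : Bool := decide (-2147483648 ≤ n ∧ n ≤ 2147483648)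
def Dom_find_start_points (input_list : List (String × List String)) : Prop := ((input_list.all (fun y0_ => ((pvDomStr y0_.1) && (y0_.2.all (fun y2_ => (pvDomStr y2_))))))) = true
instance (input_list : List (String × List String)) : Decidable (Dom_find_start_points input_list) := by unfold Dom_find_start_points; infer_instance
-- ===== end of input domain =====

-- B replaces A's per-key scan-and-reduce loop by one set union of all values and a set difference (faster: the inner scan over all values disappears; measured faster in a timing run).
-- ===== PORT A =====
def find_start_points (input_list : List (String × List String)) : List String :=
  let d := PySem.Dict.ofList input_list
  let start_points := (PySem.Dict.keys d).foldl (fun sp i =>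
    let s := (PySem.Dict.values d).map (fun x => x.contains i)
    -- reduce(or, s): s is nonempty whenever the key loop runs (a key exists ⇒ a value exists)
    match s with
    | [] => sp   -- unreachable: reduce on an empty s would raise, but then keys is empty and the loop body never runs
    | h :: t =>
      let r := t.foldl (fun x y => x || y) h
      if !r then sp ++ [i] else sp) []
  PySem.List.sorted start_points (fun x => x) false

-- ===== PORT B =====
def find_start_points_alt (input_list : List (String × List String)) : List String :=
  let d := PySem.Dict.ofList input_list
  let used := (PySem.Dict.values d).foldl (fun s v => PySem.Set.union s v) PySem.Set.empty
  PySem.List.sorted (PySem.Set.diff (PySem.Set.ofList (PySem.Dict.keys d)) used) (fun x => x) false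

-- ===== PRECONDITION & SPEC =====
def Spec_find_start_points (input_list : List (String × List String)) (out : List String) : Prop := out = find_start_points_alt input_list
instance (input_list : List (String × List String)) (out : List String) : Decidable (Spec_find_start_points input_list out) := by unfold Spec_find_start_points; infer_instance

-- ===== CLAIM (what is proved, stated in full; the proofs are below) =====
def Claim_equal_find_start_points : Prop := ∀ (input_list : List (String × List String)), Dom_find_start_points input_list → Spec_find_start_points input_list (find_start_points input_list)

-- ===== LEMMAS AND PROOFS =====

-- reduce(lambda x, y: x or y, h :: t) is any of the list
theorem reduce_or_eq_any (h : Bool) (t : List Bool) :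
    t.foldl (fun x y => x || y) h = (h :: t).any id := by
  induction t generalizing h with
  | nil => simp
  | cons b t ih => simp [List.foldl_cons, ih (h || b), List.any_cons, Bool.or_assoc]

-- membership in the folded union of the value lists
theorem mem_foldl_union (l : List (List String)) (s : PySem.Set String) (y : String) :
    y ∈ l.foldl (fun s v => PySem.Set.union s v) s ↔ y ∈ s ∨ ∃ v ∈ l, y ∈ v := by
  induction l generalizing s with
  | nil => simp
  | cons v l ih =>
      simp only [List.foldl_cons, ih, PySem.Set.mem_union]
      constructor
      · rintro ((h | h) | h)
        · exact Or.inl h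
        · exact Or.inr ⟨v, by simp, h⟩
        · obtain ⟨w, hw, hy⟩ := h; exact Or.inr ⟨w, by simp [hw], hy⟩
      · rintro (h | ⟨w, hw, hy⟩)
        · exact Or.inl (Or.inl h)
        · rcases List.mem_cons.mp hw with rfl | hw
          · exact Or.inl (Or.inr hy)
          · exact Or.inr ⟨w, hw, hy⟩

-- A's key loop, when at least one value list exists, is a filter on "no value list contains the key"
theorem loopA_eq_filter (w : List String) (ws : List (List String))
    (ks : List String) (sp : List String) :
    ks.foldl (fun sp i =>
      if !((ws.map (fun x => x.contains i)).foldl (fun x y => x || y) (w.contains i))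
      then sp ++ [i] else sp) sp
    = sp ++ ks.filter (fun i => !((w :: ws).any (fun x => x.contains i))) := by
  have hr : ∀ i : String,
      (ws.map (fun x => x.contains i)).foldl (fun x y => x || y) (w.contains i)
      = (w :: ws).any (fun x => x.contains i) := by
    intro i
    rw [reduce_or_eq_any]
    show ((w :: ws).map (fun x => x.contains i)).any id = _
    rw [List.any_map]
    rfl
  induction ks generalizing sp with
  | nil => simp
  | cons k ks ih =>
      rw [List.foldl_cons, hr k, ih, List.filter_cons]
      by_cases hc : ((w :: ws).any (fun x => x.contains k)) = true
      · rw [hc]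
        simp
      · rw [Bool.not_eq_true] at hc
        rw [hc]
        simp [List.append_assoc]

-- ===== VERDICT (by name: the statement is the Claim_ definition above) =====
theorem find_start_points_spec : Claim_equal_find_start_points := by
  intro input_list _
  unfold Spec_find_start_points
  simp only [find_start_points, find_start_points_alt]
  set d := PySem.Dict.ofList input_list with hd
  have hnd : (PySem.Dict.keys d).Nodup := PySem.Dict.nodup_keys_ofList input_list
  have hlen : (PySem.Dict.values d).length = (PySem.Dict.keys d).length := by
    simp [PySem.Dict.values, PySem.Dict.keys]
  congr 1
  cases hv : PySem.Dict.values d with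
  | nil =>
      have hk : PySem.Dict.keys d = [] := by
        apply List.length_eq_zero_iff.mp
        rw [← hlen, hv]; rfl
      simp [hk, PySem.Set.ofList, PySem.Set.diff]
  | cons w ws =>
      simp only [List.map_cons]
      rw [loopA_eq_filter w ws (PySem.Dict.keys d) [], List.nil_append,
        PySem.Set.ofList_eq_self_of_nodup _ hnd]
      show _ = (PySem.Dict.keys d).filter
          (fun x => !(PySem.Set.contains ((w :: ws).foldl (fun s v => PySem.Set.union s v) PySem.Set.empty) x))
      apply List.filter_congr
      intro k _
      congr 1
      rw [Bool.eq_iff_iff]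
      simp only [PySem.Set.contains_iff, mem_foldl_union, List.any_eq_true, List.contains_iff_mem]
      simp [PySem.Set.empty]
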